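-- pv_equiv track=rewrite | github.com/guohuadeng/odoo12-x64 | runtime/python3/Lib/site-packages/alibabacloud_openapi_util/client.py | prepare_headers
-- ===== SOURCE A (Python) =====
-- def to_str(val):
--     if val is None:
--         return val
--
--     if isinstance(val, bytes):
--         return str(val, encoding='utf-8')
--     else:
--         return str(val)
--
-- def prepare_headers(headers):
--     canon_keys = []
--     tmp_headers = {}
--     for k, v in headers.items():
--         if v is not None:
--             if k.lower() not in canon_keys:
--                 canon_keys.append(k.lower())
--                 tmp_headers[k.lower()] = [to_str(v).strip()]
--             else:
--                 tmp_headers[k.lower()].append(to_str(v).strip())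
--     canon_keys.sort()
--     return {key: ','.join(sorted(tmp_headers[key])) for key in canon_keys}
-- ===== SOURCE B (Python) =====
-- def prepare_headers(headers):
--     # One sort of (lowercased key, stripped value) pairs replaces the
--     # list-membership grouping, the parallel canon_keys list and the per-key
--     # re-sorts: pairs come out grouped by key (keys in sorted order) with the
--     # values of each key already sorted, so a single accumulation pass builds
--     # the comma-joined result.
--     pairs = sorted((k.lower(), str(v).strip()) for k, v in headers.items() if v is not None)
--     out = {}
--     for k, v in pairs:
--         out[k] = out[k] + ',' + v if k in out else v
--     return out
-- ===== Notes on version B (the rewrite author's own statement) =====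
-- stated objective: faster
-- what changed: Replaces A's list-membership grouping with a parallel canon_keys list, per-key list appends and per-key re-sorts by one sort of the (lowercased key, stripped value) pairs followed by a single accumulation pass that comma-joins each key's already-sorted values.
import Mathlib
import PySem

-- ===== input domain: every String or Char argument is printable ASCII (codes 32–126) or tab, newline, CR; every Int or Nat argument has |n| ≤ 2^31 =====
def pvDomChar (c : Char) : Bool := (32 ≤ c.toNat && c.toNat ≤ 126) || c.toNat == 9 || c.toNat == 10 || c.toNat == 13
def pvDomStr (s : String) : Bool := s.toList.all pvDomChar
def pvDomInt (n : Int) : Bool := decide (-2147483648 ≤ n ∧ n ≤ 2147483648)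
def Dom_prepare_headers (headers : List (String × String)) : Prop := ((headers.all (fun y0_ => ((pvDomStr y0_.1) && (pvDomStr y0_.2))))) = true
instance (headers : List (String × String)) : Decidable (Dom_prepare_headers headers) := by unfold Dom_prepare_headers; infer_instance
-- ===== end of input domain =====

-- B replaces A's list-membership grouping + parallel key list + per-key re-sorts by a
-- single sort of (lowercased key, stripped value) pairs followed by one accumulation pass
-- (objective: faster — drops the per-item linear canon_keys scan; measured).

-- ===== PORT A =====
-- Python to_str: on a str-typed value (the declared type here) both None/bytes branches
-- are dead, so to_str is the identity.
def to_str (val : String) : String := val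

def prepare_headers (headers : List (String × String)) : List (String × String) :=
  -- canon_keys / tmp_headers loop over headers.items()
  let st := headers.foldl
    (fun (st : List String × PySem.Dict String (List String)) kv =>
      -- 'v is not None' is always true for a str value
      if st.1.contains (PySem.Str.lower kv.1) = false then
        (st.1 ++ [PySem.Str.lower kv.1],
         st.2.insert (PySem.Str.lower kv.1) [PySem.Str.strip (to_str kv.2)])
      else
        -- tmp_headers[k.lower()].append(...): key provably present here, modify is exact
        (st.1, st.2.modify (PySem.Str.lower kv.1) []
          (fun vs => vs ++ [PySem.Str.strip (to_str kv.2)])))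
    ([], PySem.Dict.empty)
  -- canon_keys.sort(); {key: ','.join(sorted(tmp_headers[key])) for key in canon_keys}
  (PySem.List.sorted st.1 (fun x => x) false).map
    (fun key => (key, PySem.Str.join ","
      (PySem.List.sorted (st.2.getD key []) (fun x => x) false)))

-- ===== PORT B =====
def prepare_headers_alt (headers : List (String × String)) : List (String × String) :=
  -- pairs = sorted((k.lower(), str(v).strip()) for k, v in headers.items() if v is not None)
  let pairs := PySem.List.sorted2
      (headers.map (fun kv => (PySem.Str.lower kv.1, PySem.Str.strip kv.2)))
      (fun p => p.1) (fun p => p.2) false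
  -- for k, v in pairs: out[k] = out[k] + ',' + v if k in out else v
  (pairs.foldl
    (fun (out : PySem.Dict String String) p =>
      out.insert p.1 (if out.contains p.1 then out.getD p.1 "" ++ "," ++ p.2 else p.2))
    PySem.Dict.empty).items

-- ===== PRECONDITION & SPEC =====
def Spec_prepare_headers (headers : List (String × String)) (out : List (String × String)) : Prop := out = prepare_headers_alt headers
instance (headers : List (String × String)) (out : List (String × String)) : Decidable (Spec_prepare_headers headers out) := by unfold Spec_prepare_headers; infer_instance

-- ===== CLAIM (what is proved, stated in full; the proofs are below) =====
def Claim_equal_prepare_headers : Prop := ∀ (headers : List (String × String)), Dom_prepare_headers headers → Spec_prepare_headers headers (prepare_headers headers)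

-- ===== LEMMAS AND PROOFS =====

-- the normalized pair list both programs work from
def normPairs (headers : List (String × String)) : List (String × String) :=
  headers.map (fun kv => (PySem.Str.lower kv.1, PySem.Str.strip kv.2))

-- the common canonical result: sorted distinct keys, each with its sorted joined values
def canonOut (P : List (String × String)) : List (String × String) :=
  (PySem.List.sorted (PySem.Set.ofList (P.map (fun p => p.1))) (fun x => x) false).map
    (fun k => (k, PySem.Str.join ","
      (PySem.List.sorted ((P.filter (fun p => p.1 == k)).map (fun p => p.2)) (fun x => x) false)))

-- ---- small Dict facts ----
lemma dict_get?_of_contains_false {κ ν : Type} [BEq κ] (d : PySem.Dict κ ν) (k : κ)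
    (h : d.contains k = false) : d.get? k = none := by
  simp only [PySem.Dict.get?, PySem.Dict.contains, List.any_eq_false] at *
  rw [List.find?_eq_none.2 (by intro x hx; exact fun hb => by simp [h x hx] at hb)]
  rfl

lemma dict_get?_of_contains_true {κ ν : Type} [BEq κ] (d : PySem.Dict κ ν) (k : κ)
    (h : d.contains k = true) : ∃ s, d.get? k = some s := by
  simp only [PySem.Dict.get?, PySem.Dict.contains, List.any_eq_true] at *
  obtain ⟨p, hp, hb⟩ := h
  obtain ⟨q, hq⟩ := (List.find?_isSome (p := fun p => p.1 == k) (xs := d.items)).2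
    ⟨p, hp, hb⟩ |> Option.isSome_iff_exists.1
  exact ⟨q.2, by rw [hq]; rfl⟩

-- ---- A's fold equals the unconditional add/modify fold over normPairs ----
def stepA (st : List String × PySem.Dict String (List String)) (kv : String × String) :
    List String × PySem.Dict String (List String) :=
  if st.1.contains (PySem.Str.lower kv.1) = false then
    (st.1 ++ [PySem.Str.lower kv.1],
     st.2.insert (PySem.Str.lower kv.1) [PySem.Str.strip (to_str kv.2)])
  else
    (st.1, st.2.modify (PySem.Str.lower kv.1) []
      (fun vs => vs ++ [PySem.Str.strip (to_str kv.2)]))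

def stepA' (st : List String × PySem.Dict String (List String)) (p : String × String) :
    List String × PySem.Dict String (List String) :=
  (PySem.Set.add st.1 p.1, st.2.modify p.1 [] (fun vs => vs ++ [p.2]))

def InvA (st : List String × PySem.Dict String (List String)) : Prop :=
  ∀ k, k ∈ st.1 ↔ st.2.contains k = true

lemma set_contains_eq_list_contains {α : Type} [BEq α] (s : PySem.Set α) (x : α) :
    PySem.Set.contains s x = List.contains s x := rfl

lemma stepA_eq_stepA' (st : List String × PySem.Dict String (List String))
    (kv : String × String) (hinv : InvA st) :
    stepA st kv = stepA' st (PySem.Str.lower kv.1, PySem.Str.strip kv.2) := by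
  unfold stepA stepA' PySem.Set.add
  rw [set_contains_eq_list_contains]
  by_cases h : st.1.contains (PySem.Str.lower kv.1) = false
  · have hmem : PySem.Str.lower kv.1 ∉ st.1 :=
      fun hm => absurd h (by simp; exact hm)
    rw [if_pos h, if_neg (by simpa using hmem)]
    have hdc : st.2.contains (PySem.Str.lower kv.1) = false := by
      cases hc : st.2.contains (PySem.Str.lower kv.1) with
      | false => rfl
      | true => exact absurd ((hinv _).2 hc) hmem
    have hd : st.2.getD (PySem.Str.lower kv.1) [] = [] := by
      simp [PySem.Dict.getD, dict_get?_of_contains_false _ _ hdc]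
    simp [PySem.Dict.modify, hd, to_str]
  · rw [if_neg h, if_pos (by simpa using h)]
    simp [to_str]

lemma invA_stepA' (st : List String × PySem.Dict String (List String))
    (p : String × String) (hinv : InvA st) : InvA (stepA' st p) := by
  intro k
  unfold stepA'
  simp only [PySem.Dict.modify, PySem.Dict.contains_insert]
  rw [PySem.Set.mem_add]
  constructor
  · rintro (hm | rfl)
    · simp [(hinv k).1 hm]
    · simp
  · intro hb
    have hb' : k = p.1 ∨ st.2.contains k = true := by simpa using hb
    rcases hb' with hb | hb
    · exact Or.inr hb
    · exact Or.inl ((hinv k).2 hb)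

lemma foldA_eq : ∀ (l : List (String × String)) (st : List String × PySem.Dict String (List String)),
    InvA st → l.foldl stepA st = (l.map (fun kv => (PySem.Str.lower kv.1, PySem.Str.strip kv.2))).foldl stepA' st := by
  intro l
  induction l with
  | nil => intro st _; rfl
  | cons kv l ih =>
    intro st hinv
    simp only [List.foldl_cons, List.map_cons]
    rw [stepA_eq_stepA' st kv hinv]
    exact ih _ (invA_stepA' st _ hinv)

lemma invA_nil : InvA ([], PySem.Dict.empty) := by
  intro k
  simp [PySem.Dict.contains_empty]

-- the update of a set by a list appends a sublist of that list
lemma set_update_sublist {α : Type} [BEq α] :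
    ∀ (xs acc : List α), ∃ t, PySem.Set.update acc xs = acc ++ t ∧ t.Sublist xs := by
  intro xs
  induction xs with
  | nil => intro acc; exact ⟨[], by simp [PySem.Set.update], List.nil_sublist _⟩
  | cons x xs ih =>
    intro acc
    have hstep : PySem.Set.update acc (x :: xs) = PySem.Set.update (PySem.Set.add acc x) xs := rfl
    unfold PySem.Set.add at hstep
    by_cases h : PySem.Set.contains acc x = true
    · obtain ⟨t, ht, hs⟩ := ih acc
      refine ⟨t, ?_, hs.cons x⟩
      rw [hstep, if_pos h]
      exact ht
    · obtain ⟨t, ht, hs⟩ := ih (acc ++ [x])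
      refine ⟨x :: t, ?_, hs.cons₂ x⟩
      rw [hstep, if_neg h, ht, List.append_assoc]
      rfl

lemma set_ofList_sublist {α : Type} [BEq α] (xs : List α) :
    (PySem.Set.ofList xs).Sublist xs := by
  obtain ⟨t, ht, hs⟩ := set_update_sublist xs []
  have : PySem.Set.ofList xs = t := by
    have : PySem.Set.ofList xs = PySem.Set.update [] xs := rfl
    rw [this, ht]; rfl
  rw [this]; exact hs

-- A's result is the canonical one
lemma A_eq_canon (headers : List (String × String)) :
    prepare_headers headers = canonOut (normPairs headers) := by
  simp only [prepare_headers, canonOut, normPairs]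
  rw [show (fun (st : List String × PySem.Dict String (List String)) kv =>
      if st.1.contains (PySem.Str.lower kv.1) = false then
        (st.1 ++ [PySem.Str.lower kv.1],
         st.2.insert (PySem.Str.lower kv.1) [PySem.Str.strip (to_str kv.2)])
      else
        (st.1, st.2.modify (PySem.Str.lower kv.1) []
          (fun vs => vs ++ [PySem.Str.strip (to_str kv.2)]))) = stepA from rfl]
  rw [foldA_eq headers ([], PySem.Dict.empty) invA_nil]
  rw [show stepA' = (fun (s : List String × PySem.Dict String (List String))
        (e : String × String) =>
      ((fun c (e : String × String) => PySem.Set.add c e.1) s.1 e,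
       (fun (d : PySem.Dict String (List String)) (e : String × String) =>
          d.modify e.1 [] (fun vs => vs ++ [e.2])) s.2 e)) from rfl]
  rw [PySem.List.foldl_prod_mk
      (f := fun c (e : String × String) => PySem.Set.add c e.1)
      (g := fun (d : PySem.Dict String (List String)) (e : String × String) =>
        d.modify e.1 [] (fun vs => vs ++ [e.2]))]
  have hfst : (headers.map (fun kv => (PySem.Str.lower kv.1, PySem.Str.strip kv.2))).foldl
      (fun c (e : String × String) => PySem.Set.add c e.1) [] =
      PySem.Set.ofList ((headers.map (fun kv => (PySem.Str.lower kv.1, PySem.Str.strip kv.2))).map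
        (fun p => p.1)) := by
    unfold PySem.Set.ofList PySem.Set.empty
    simp [List.foldl_map]
  simp only [hfst, PySem.Dict.getD_foldl_modify_append, PySem.Dict.getD_empty, List.nil_append]

-- ---- B side ----
def pairBefore (a b : String × String) : Bool :=
  decide (a.1 < b.1) || (!decide (b.1 < a.1) && decide (a.2 < b.2))

lemma pairBefore_asym (a b : String × String) (h : pairBefore a b = true) :
    pairBefore b a = false := by
  cases hba : pairBefore b a with
  | false => rfl
  | true =>
    exfalso
    simp only [pairBefore, Bool.or_eq_true, Bool.and_eq_true, Bool.not_eq_eq_eq_not,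
      Bool.not_true, decide_eq_true_eq, decide_eq_false_iff_not] at h hba
    rcases h with h | ⟨h1, h2⟩ <;> rcases hba with g | ⟨g1, g2⟩
    · exact lt_asymm h g
    · exact g1 h
    · exact h1 g
    · exact lt_asymm h2 g2

lemma pairBefore_trans (a b c : String × String) (hab : pairBefore a b = true)
    (hbc : pairBefore b c = true) : pairBefore a c = true := by
  simp only [pairBefore, Bool.or_eq_true, Bool.and_eq_true, Bool.not_eq_eq_eq_not,
    Bool.not_true, decide_eq_true_eq, decide_eq_false_iff_not] at *
  rcases hab with h | ⟨h1, h2⟩ <;> rcases hbc with g | ⟨g1, g2⟩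
  · exact Or.inl (lt_trans h g)
  · exact Or.inl (lt_of_lt_of_le h (not_lt.1 g1))
  · exact Or.inl (lt_of_le_of_lt (not_lt.1 h1) g)
  · exact Or.inr ⟨fun hca => h1 (lt_of_le_of_lt (not_lt.1 g1) hca), lt_trans h2 g2⟩

lemma pairwise_insertBy (before : String × String → String × String → Bool)
    (hasym : ∀ a b, before a b = true → before b a = false)
    (htrans : ∀ a b c, before a b = true → before b c = true → before a c = true)
    (x : String × String) :
    ∀ ys, ys.Pairwise (fun a b => before b a = false) →
      (PySem.List.insertBy before x ys).Pairwise (fun a b => before b a = false) := by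
  intro ys
  induction ys with
  | nil => intro _; simp [PySem.List.insertBy]
  | cons y ys ih =>
    intro h
    rw [show PySem.List.insertBy before x (y :: ys) =
        if before x y then x :: y :: ys else y :: PySem.List.insertBy before x ys from rfl]
    rcases List.pairwise_cons.1 h with ⟨hy, hys⟩
    by_cases h1 : before x y = true
    · rw [if_pos h1]
      refine List.pairwise_cons.2 ⟨?_, h⟩
      intro z hz
      rcases List.mem_cons.1 hz with rfl | hz
      · exact hasym x _ h1
      · cases hzx : before z x with
        | false => rfl
        | true =>
          have : before z y = true := htrans z x y hzx h1
          rw [hy z hz] at this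
          exact absurd this (by simp)
    · rw [if_neg h1]
      refine List.pairwise_cons.2 ⟨?_, ih hys⟩
      intro z hz
      rcases (PySem.List.mem_insertBy before x z ys).1 hz with rfl | hz
      · simpa using h1
      · exact hy z hz

lemma pairwise_foldl_insertBy (before : String × String → String × String → Bool)
    (hasym : ∀ a b, before a b = true → before b a = false)
    (htrans : ∀ a b c, before a b = true → before b c = true → before a c = true) :
    ∀ (l acc : List (String × String)), acc.Pairwise (fun a b => before b a = false) →
      (l.foldl (fun a x => PySem.List.insertBy before x a) acc).Pairwise
        (fun a b => before b a = false) := by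
  intro l
  induction l with
  | nil => intro acc h; exact h
  | cons x l ih =>
    intro acc h
    exact ih _ (pairwise_insertBy before hasym htrans x acc h)

lemma sorted2_pairwise (P : List (String × String)) :
    (PySem.List.sorted2 P (fun p => p.1) (fun p => p.2) false).Pairwise
      (fun a b => pairBefore b a = false) := by
  have h : PySem.List.sorted2 P (fun p => p.1) (fun p => p.2) false =
      P.foldl (fun acc x => PySem.List.insertBy pairBefore x acc) [] := rfl
  rw [h]
  exact pairwise_foldl_insertBy pairBefore pairBefore_asym pairBefore_trans P [] (by simp)

lemma pairBefore_false_fst_le (a b : String × String) (h : pairBefore b a = false) :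
    a.1 ≤ b.1 := by
  simp only [pairBefore, Bool.or_eq_false_iff, Bool.and_eq_false_iff, decide_eq_false_iff_not] at h
  exact not_lt.1 h.1

lemma pairBefore_false_snd_le (a b : String × String) (h : pairBefore b a = false)
    (heq : a.1 = b.1) : a.2 ≤ b.2 := by
  simp only [pairBefore, Bool.or_eq_false_iff, Bool.and_eq_false_iff,
    decide_eq_false_iff_not] at h
  rcases h.2 with h2 | h2
  · exact absurd h2 (by simp [heq])
  · exact not_lt.1 h2

-- ---- accumulated join ----
def accJoin (s : String) (vs : List String) : String :=
  vs.foldl (fun a v => a ++ "," ++ v) s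

def accOpt (o : Option String) (vs : List String) : Option String :=
  match o, vs with
  | o, [] => o
  | some s, v :: vs => some (accJoin (s ++ "," ++ v) vs)
  | none, v :: vs => some (accJoin v vs)

lemma accOpt_some_cons (s v : String) (vs : List String) :
    accOpt (some s) (v :: vs) = accOpt (some (s ++ "," ++ v)) vs := by
  cases vs <;> rfl

lemma accOpt_none_cons (v : String) (vs : List String) :
    accOpt none (v :: vs) = accOpt (some v) vs := by
  cases vs <;> rfl

def stepB (d : PySem.Dict String String) (p : String × String) : PySem.Dict String String :=
  d.insert p.1 (if d.contains p.1 then d.getD p.1 "" ++ "," ++ p.2 else p.2)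

lemma foldB_get? : ∀ (q : List (String × String)) (d : PySem.Dict String String) (k : String),
    (q.foldl stepB d).get? k =
      accOpt (d.get? k) ((q.filter (fun p => p.1 == k)).map (fun p => p.2)) := by
  intro q
  induction q with
  | nil =>
    intro d k
    simp only [List.foldl_nil, List.filter_nil, List.map_nil]
    cases d.get? k <;> rfl
  | cons p q ih =>
    intro d k
    simp only [List.foldl_cons]
    rw [ih]
    by_cases hpk : p.1 = k
    · subst hpk
      rw [List.filter_cons_of_pos (by simp), List.map_cons]
      cases hc : d.contains p.1 with
      | false =>
        have hg : d.get? p.1 = none := dict_get?_of_contains_false d p.1 hc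
        have hs : (stepB d p).get? p.1 = some p.2 := by
          unfold stepB; rw [hc]; simp [PySem.Dict.get?_insert_self]
        rw [hs, hg, accOpt_none_cons]
      | true =>
        obtain ⟨s, hg⟩ := dict_get?_of_contains_true d p.1 hc
        have hs : (stepB d p).get? p.1 = some (s ++ "," ++ p.2) := by
          unfold stepB
          rw [hc, if_pos rfl]
          simp [PySem.Dict.get?_insert_self, PySem.Dict.getD, hg]
        rw [hs, hg, accOpt_some_cons]
    · rw [List.filter_cons_of_neg (by simp [hpk])]
      have hs : (stepB d p).get? k = d.get? k := by
        unfold stepB; exact PySem.Dict.get?_insert_of_ne d _ (Ne.symm hpk)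
      rw [hs]

-- join lemmas
lemma str_join_one (v : String) : PySem.Str.join "," [v] = v := by
  rw [← String.toList_inj]
  simp [PySem.Str.toList_join, PySem.Chars.join_singleton]

lemma str_join_cons (v w : String) (ws : List String) :
    PySem.Str.join "," (v :: w :: ws) = v ++ "," ++ PySem.Str.join "," (w :: ws) := by
  rw [← String.toList_inj, PySem.Str.toList_join]
  simp only [List.map_cons, PySem.Chars.join_cons_cons, String.toList_append,
    PySem.Str.toList_join]

lemma accJoin_eq_join : ∀ (vs : List String) (v : String),
    accJoin v vs = PySem.Str.join "," (v :: vs) := by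
  intro vs
  induction vs with
  | nil => intro v; exact (str_join_one v).symm
  | cons w ws ih =>
    intro v
    have h1 : accJoin v (w :: ws) = accJoin (v ++ "," ++ w) ws := rfl
    rw [h1, ih, str_join_cons]
    cases ws with
    | nil => rw [str_join_one, str_join_one]
    | cons u us =>
      rw [str_join_cons, str_join_cons, ← String.toList_inj]
      simp [String.toList_append, List.append_assoc]

-- B's result is the canonical one
lemma B_eq_canon (headers : List (String × String)) :
    prepare_headers_alt headers = canonOut (normPairs headers) := by
  simp only [prepare_headers_alt, canonOut, normPairs]
  rw [show (fun (out : PySem.Dict String String) (p : String × String) =>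
      out.insert p.1 (if out.contains p.1 then out.getD p.1 "" ++ "," ++ p.2 else p.2)) = stepB
      from rfl]
  set P := headers.map (fun kv => (PySem.Str.lower kv.1, PySem.Str.strip kv.2)) with hP
  set sp := PySem.List.sorted2 P (fun p => p.1) (fun p => p.2) false with hsp
  have hpw : sp.Pairwise (fun a b => pairBefore b a = false) := sorted2_pairwise P
  have hperm : sp.Perm P := PySem.List.sorted2_perm P _ _ false
  have hout := PySem.Dict.keys_foldl_insert_key (ν := String) sp (fun p => p.1)
      (fun d p => if d.contains p.1 then d.getD p.1 "" ++ "," ++ p.2 else p.2) PySem.Dict.empty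
  have hkeys : (sp.foldl stepB PySem.Dict.empty).keys =
      PySem.Set.ofList (sp.map (fun p => p.1)) := by
    rw [show (sp.foldl stepB PySem.Dict.empty).keys =
        (sp.foldl (fun d p => d.insert p.1
          (if d.contains p.1 then d.getD p.1 "" ++ "," ++ p.2 else p.2)) PySem.Dict.empty).keys
        from rfl]
    rw [hout, PySem.Dict.keys_empty]
    rfl
  have hnodup : (sp.foldl stepB PySem.Dict.empty).keys.Nodup := by
    rw [show (sp.foldl stepB PySem.Dict.empty) =
        (sp.foldl (fun d p => d.insert p.1
          (if d.contains p.1 then d.getD p.1 "" ++ "," ++ p.2 else p.2)) PySem.Dict.empty)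
        from rfl]
    exact PySem.Dict.nodup_keys_foldl_insert_key sp _ _ _ PySem.Dict.nodup_keys_empty
  rw [PySem.Dict.items_eq_map_keys _ hnodup "", hkeys]
  -- the two key lists agree
  have hfst_le : (sp.map (fun p => p.1)).Pairwise (fun a b => a ≤ b) :=
    List.pairwise_map.2 (hpw.imp (fun h => pairBefore_false_fst_le _ _ h))
  have hKsub : (PySem.Set.ofList (sp.map (fun p => p.1))).Sublist (sp.map (fun p => p.1)) :=
    set_ofList_sublist _
  have hKlt : (PySem.Set.ofList (sp.map (fun p => p.1))).Pairwise (fun a b => a < b) := by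
    have hle := hfst_le.sublist hKsub
    have hne : (PySem.Set.ofList (sp.map (fun p => p.1))).Pairwise (fun a b => a ≠ b) :=
      PySem.Set.nodup_ofList _
    exact (hle.and hne).imp (fun h => lt_of_le_of_ne h.1 h.2)
  have hKperm : (PySem.Set.ofList (sp.map (fun p => p.1))).Perm
      (PySem.Set.ofList (P.map (fun p => p.1))) := by
    rw [List.perm_ext_iff_of_nodup (PySem.Set.nodup_ofList _) (PySem.Set.nodup_ofList _)]
    intro a
    rw [PySem.Set.mem_ofList, PySem.Set.mem_ofList]
    constructor
    · rintro h
      obtain ⟨p, hp, rfl⟩ := List.mem_map.1 h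
      exact List.mem_map.2 ⟨p, hperm.mem_iff.1 hp, rfl⟩
    · rintro h
      obtain ⟨p, hp, rfl⟩ := List.mem_map.1 h
      exact List.mem_map.2 ⟨p, hperm.mem_iff.2 hp, rfl⟩
  have hK : PySem.List.sorted (PySem.Set.ofList (P.map (fun p => p.1))) (fun x => x) false =
      PySem.Set.ofList (sp.map (fun p => p.1)) :=
    PySem.List.sorted_eq_of_perm_of_pairwise_lt _ _ _ hKperm hKlt
  rw [hK]
  -- pointwise equality on the shared key list
  apply List.map_congr_left
  intro k hk
  have hkmem : k ∈ sp.map (fun p => p.1) := hKsub.mem hk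
  obtain ⟨p, hp, hpk⟩ := List.mem_map.1 hkmem
  have hfilt : p ∈ sp.filter (fun p => p.1 == k) :=
    List.mem_filter.2 ⟨hp, by simp [hpk]⟩
  -- values of key k come out of the sorted pair list already sorted
  have hvperm : ((sp.filter (fun p => p.1 == k)).map (fun p => p.2)).Perm
      ((P.filter (fun p => p.1 == k)).map (fun p => p.2)) :=
    (hperm.filter _).map _
  have hvle : ((sp.filter (fun p => p.1 == k)).map (fun p => p.2)).Pairwise
      (fun a b => a ≤ b) := by
    refine List.pairwise_map.2 ?_
    refine (hpw.sublist List.filter_sublist).imp_of_mem ?_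
    intro a b ha hb hr
    have hak : a.1 = k := by simpa using (List.mem_filter.1 ha).2
    have hbk : b.1 = k := by simpa using (List.mem_filter.1 hb).2
    exact pairBefore_false_snd_le a b hr (hak.trans hbk.symm)
  have hvals : PySem.List.sorted ((P.filter (fun p => p.1 == k)).map (fun p => p.2))
      (fun x => x) false = (sp.filter (fun p => p.1 == k)).map (fun p => p.2) :=
    PySem.List.sorted_id_eq_of_perm_of_pairwise _ _ hvperm hvle
  rw [hvals]
  -- the accumulated dict value is the comma-join of exactly those values
  cases hv : (sp.filter (fun p => p.1 == k)).map (fun p => p.2) with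
  | nil =>
    exact absurd (List.mem_map.2 ⟨p, hfilt, rfl⟩) (by rw [hv]; simp)
  | cons v vs =>
    have hg : (sp.foldl stepB PySem.Dict.empty).getD k "" = accJoin v vs := by
      rw [PySem.Dict.getD, foldB_get?]
      rw [show (PySem.Dict.empty : PySem.Dict String String).get? k = none from
        dict_get?_of_contains_false _ _ (PySem.Dict.contains_empty k)]
      rw [hv]
      rfl
    rw [hg, accJoin_eq_join]

-- ===== VERDICT (by name: the statement is the Claim_ definition above) =====
theorem prepare_headers_spec : Claim_equal_prepare_headers := by
  intro headers _
  unfold Spec_prepare_headers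
  rw [A_eq_canon, B_eq_canon]
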